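-- pv_equiv track=rewrite | github.com/wildlifeniki/unicuspidal-rational-curves | cuspidalcurves.py | singleNewtonPairs
-- ===== SOURCE A (Python) =====
-- def singleNewtonPairs(degree):
--     pairs = []
--     d_inv = int(((degree - 1) * (degree - 2)))
--
--     for m in range(1, degree * degree):
--         for n in range(m, degree * degree):
--             d_inv_check = ((m - 1) * (n - 1))
--             if (d_inv_check == d_inv):
--                 valid = True
--                 for l in range(1, 4):
--                     semigroup = getSemigroup(m, n, l, degree)
--                     compare = (l+1)*(l+2)/2
--                     if(len(semigroup) != compare):
--                         valid = False
--                 if(valid):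
--                     pairs.append((m, n))
--
--     return pairs
--
-- def getSemigroup(a, b, l, degree):
--     semigroup = [0]
--     maxVal = l * degree
--     for num in semigroup:
--         numa = num + a
--         numb = num + b
--         if (numa not in semigroup and numa <= maxVal):
--             semigroup.append(numa)
--             semigroup.sort()
--         if (numb not in semigroup and numb <= maxVal):
--             semigroup.append(numb)
--             semigroup.sort()
--         if (numa > maxVal and numb > maxVal):
--             return semigroup
-- ===== SOURCE B (Python) =====
-- def singleNewtonPairs(degree):
--     d_inv = (degree - 1) * (degree - 2)
--     limit = degree * degree
--     pairs = []
--     if d_inv == 0: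
--         for n in range(1, limit):
--             if _passes(1, n, degree):
--                 pairs.append((1, n))
--     else:
--         e = 1
--         while e * e <= d_inv:
--             if d_inv % e == 0:
--                 m = e + 1
--                 n = d_inv // e + 1
--                 if n < limit and _passes(m, n, degree):
--                     pairs.append((m, n))
--             e += 1
--     return pairs
--
--
-- def _passes(m, n, degree):
--     for l in range(1, 4):
--         if _count(m, n, l * degree) != (l + 1) * (l + 2) // 2:
--             return False
--     return True
--
--
-- def _count(a, b, maxval):
--     if maxval < 0:
--         return 0
--     elems = {0}
--     for k in range(1, maxval + 1):
--         if (k - a) in elems or (k - b) in elems: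
--             elems.add(k)
--     return len(elems)
-- ===== Notes on version B (the rewrite author's own statement) =====
-- stated objective: faster
-- what changed: B replaces A's O(degree^2 x degree^2) scan over all (m,n) pairs by direct enumeration of the divisors e of d_inv=(degree-1)(degree-2) up to sqrt(d_inv) (with a plain n-loop when d_inv=0), and replaces A's sort-as-you-go semigroup worklist by a single linear membership sweep over 0..l*degree.
import Mathlib
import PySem

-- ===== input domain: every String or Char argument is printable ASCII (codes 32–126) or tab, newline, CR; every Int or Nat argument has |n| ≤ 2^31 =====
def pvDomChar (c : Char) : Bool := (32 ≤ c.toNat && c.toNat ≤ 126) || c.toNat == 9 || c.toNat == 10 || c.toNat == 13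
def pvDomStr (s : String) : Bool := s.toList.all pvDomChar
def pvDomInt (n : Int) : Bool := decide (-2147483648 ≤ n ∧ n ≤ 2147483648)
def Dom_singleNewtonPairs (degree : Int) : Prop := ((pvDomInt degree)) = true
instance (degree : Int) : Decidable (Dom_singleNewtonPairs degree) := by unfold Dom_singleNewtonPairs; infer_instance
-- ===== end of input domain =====

-- B replaces A's O(degree^4) scan over all (m,n) by divisor enumeration of d_inv and A's
-- sort-as-you-go semigroup worklist by a linear membership sweep; measured faster (asymptotic).

-- ===== PORT A =====
-- getSemigroup's `for num in semigroup` iterates by index over a list that is appended to and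
-- re-sorted while being traversed; ported as index recursion with fuel.  All inserted values
-- exceed the value at the current index, so the loop always leaves via the
-- `numa > maxVal and numb > maxVal` return for the a = m ≥ 1, b = n ≥ 1 calls singleNewtonPairs
-- makes; the fuel-out and list-exhausted fallbacks below are unreachable there (proved in the
-- lemmas: the list holds distinct integers of [0, maxVal], so maxVal.toNat + 2 steps suffice).
def getSemigroupLoop (a b maxVal : Int) : Nat → List Int → Nat → List Int
  | 0, sg, _ => sg
  | fuel+1, sg, idx =>
    match sg[idx]? with
    | none => sg
    | some num =>
      let numa := num + a
      let numb := num + b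
      let sg1 := if ¬ num + a ∈ sg ∧ num + a ≤ maxVal
        then PySem.List.sorted (sg ++ [numa]) (fun x => x) false else sg
      let sg2 := if ¬ num + b ∈ sg1 ∧ num + b ≤ maxVal
        then PySem.List.sorted (sg1 ++ [numb]) (fun x => x) false else sg1
      if numa > maxVal ∧ numb > maxVal then sg2
      else getSemigroupLoop a b maxVal fuel sg2 (idx+1)

def getSemigroup (a b l degree : Int) : List Int :=
  getSemigroupLoop a b (l * degree) ((l * degree).toNat + 2) [0] 0

-- `compare = (l+1)*(l+2)/2` is Python float division; (l+1)*(l+2) is even and tiny (l ∈ {1,2,3}),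
-- so the comparison with len(semigroup) is exactly integer `(l+1)*(l+2)/2` (= 3, 6, 10).
def singleNewtonPairs (degree : Int) : List (Int × Int) :=
  let d_inv := (degree - 1) * (degree - 2)
  (PySem.List.pyRange 1 (degree * degree) 1).foldl (fun pairs m =>
    (PySem.List.pyRange m (degree * degree) 1).foldl (fun pairs n =>
      if (m - 1) * (n - 1) = d_inv then
        let valid := (PySem.List.pyRange 1 4 1).foldl (fun valid l =>
          let semigroup := getSemigroup m n l degree
          if ((semigroup.length : Int) ≠ (l+1)*(l+2)/2) then false else valid) true
        if valid then pairs ++ [(m, n)] else pairs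
      else pairs) pairs) []

-- ===== PORT B =====
def pvCount (a b maxval : Int) : Int :=
  if maxval < 0 then 0
  else
    ((PySem.List.pyRange 1 (maxval + 1) 1).foldl
      (fun elems k =>
        if (k - a) ∈ elems ∨ (k - b) ∈ elems then PySem.Set.add elems k else elems)
      (PySem.Set.ofList [(0 : Int)])).length

def pvPasses (m n degree : Int) : Bool :=
  (PySem.List.pyRange 1 4 1).all
    (fun l => pvCount m n (l * degree) == (l+1)*(l+2)/2)

-- Source B's `while e * e <= d_inv` loop; e stays ≤ d_inv (e ≥ 1), so fuel d_inv.toNat + 1 suffices.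
def pvDivLoop (d_inv limit degree : Int) : Nat → Int → List (Int × Int) → List (Int × Int)
  | 0, _, pairs => pairs
  | fuel+1, e, pairs =>
    if e * e ≤ d_inv then
      let pairs' :=
        if PySem.Int.mod d_inv e = 0 then
          let m := e + 1
          let n := PySem.Int.floordiv d_inv e + 1
          if n < limit ∧ pvPasses m n degree then pairs ++ [(m, n)] else pairs
        else pairs
      pvDivLoop d_inv limit degree fuel (e + 1) pairs'
    else pairs

def singleNewtonPairs_alt (degree : Int) : List (Int × Int) :=
  let d_inv := (degree - 1) * (degree - 2)
  let limit := degree * degree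
  if d_inv = 0 then
    (PySem.List.pyRange 1 limit 1).foldl
      (fun pairs n => if pvPasses 1 n degree then pairs ++ [(1, n)] else pairs) []
  else
    pvDivLoop d_inv limit degree (d_inv.toNat + 1) 1 []

-- ===== PRECONDITION & SPEC =====
def Spec_singleNewtonPairs (degree : Int) (out : List (Int × Int)) : Prop := out = singleNewtonPairs_alt degree
instance (degree : Int) (out : List (Int × Int)) : Decidable (Spec_singleNewtonPairs degree out) := by unfold Spec_singleNewtonPairs; infer_instance

-- ===== CLAIM (what is proved, stated in full; the proofs are below) =====
def Claim_equal_singleNewtonPairs : Prop := ∀ (degree : Int), Dom_singleNewtonPairs degree → Spec_singleNewtonPairs degree (singleNewtonPairs degree)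

-- ===== LEMMAS AND PROOFS =====

-- The numerical semigroup generated by a and b.
inductive InSemi (a b : Int) : Int → Prop
  | zero : InSemi a b 0
  | addA {x : Int} : InSemi a b x → InSemi a b (x + a)
  | addB {x : Int} : InSemi a b x → InSemi a b (x + b)

theorem insemi_nonneg {a b x : Int} (ha : 1 ≤ a) (hb : 1 ≤ b) (h : InSemi a b x) : 0 ≤ x := by
  induction h with
  | zero => omega
  | addA _ ih => omega
  | addB _ ih => omega

theorem insemi_inv {a b x : Int} (ha : 1 ≤ a) (hb : 1 ≤ b) (h : InSemi a b x) :
    x = 0 ∨ (InSemi a b (x - a) ∧ 0 ≤ x - a) ∨ (InSemi a b (x - b) ∧ 0 ≤ x - b) := by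
  cases h with
  | zero => left; rfl
  | @addA y hy => right; left; exact ⟨by simpa using hy, (by have := insemi_nonneg ha hb hy; omega)⟩
  | @addB y hy => right; right; exact ⟨by simpa using hy, (by have := insemi_nonneg ha hb hy; omega)⟩

-- ---- B side: the membership sweep computes exactly the semigroup elements of [0, K] ----

-- a foldl whose step never changes the accumulator is the identity
theorem foldl_id {α β : Type} (l : List β) (f : α → β → α)
    (h : ∀ (acc : α) (x : β), x ∈ l → f acc x = acc) : ∀ acc, l.foldl f acc = acc := by
  induction l with
  | nil => intro acc; rfl
  | cons y t ih =>
    intro acc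
    rw [List.foldl_cons, h acc y (by simp)]
    exact ih (fun acc' x hx => h acc' x (List.mem_cons_of_mem _ hx)) acc
    
theorem pvSweep_spec (a b : Int) (ha : 1 ≤ a) (hb : 1 ≤ b) : ∀ t : Nat,
    ((PySem.List.pyRange 1 ((t : Int) + 1) 1).foldl
      (fun elems k => if (k - a) ∈ elems ∨ (k - b) ∈ elems then PySem.Set.add elems k else elems)
      (PySem.Set.ofList [(0 : Int)])).Nodup ∧
    (∀ x, x ∈ (PySem.List.pyRange 1 ((t : Int) + 1) 1).foldl
      (fun elems k => if (k - a) ∈ elems ∨ (k - b) ∈ elems then PySem.Set.add elems k else elems)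
      (PySem.Set.ofList [(0 : Int)]) ↔ (InSemi a b x ∧ 0 ≤ x ∧ x ≤ (t : Int))) := by
  intro t
  induction t with
  | zero =>
    rw [PySem.List.pyRange_one_eq_nil (by omega)]
    refine ⟨PySem.Set.nodup_ofList _, fun x => ?_⟩
    constructor
    · intro hx
      have : x = 0 := by simpa [PySem.Set.ofList, PySem.Set.add, PySem.Set.empty] using hx
      exact ⟨this ▸ InSemi.zero, by omega, by omega⟩
    · intro ⟨_, h0, h1⟩
      have : x = 0 := by omega
      simp [this, PySem.Set.ofList, PySem.Set.add, PySem.Set.empty]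
  | succ t ih =>
    obtain ⟨ihN, ihM⟩ := ih
    have hsplit : PySem.List.pyRange 1 ((t : Int) + 1 + 1) 1
        = PySem.List.pyRange 1 ((t : Int) + 1) 1 ++ [(t : Int) + 1] := by
      have h2 : PySem.List.pyRange ((t : Int) + 1) ((t : Int) + 1 + 1) = [(t : Int) + 1] :=
        PySem.List.pyRange_one_singleton _
      rw [PySem.List.pyRange_one_append 1 ((t : Int) + 1) ((t : Int) + 1 + 1) (by omega) (by omega), h2]
    push_cast
    rw [hsplit, List.foldl_append]
    set E := (PySem.List.pyRange 1 ((t : Int) + 1) 1).foldl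
      (fun elems k => if (k - a) ∈ elems ∨ (k - b) ∈ elems then PySem.Set.add elems k else elems)
      (PySem.Set.ofList [(0 : Int)]) with hE
    set K : Int := (t : Int) + 1 with hK
    simp only [List.foldl_cons, List.foldl_nil]
    by_cases hc : (K - a) ∈ E ∨ (K - b) ∈ E
    · rw [if_pos hc]
      refine ⟨PySem.Set.nodup_add _ _ ihN, fun x => ?_⟩
      rw [PySem.Set.mem_add]
      constructor
      · rintro (hx | rfl)
        · obtain ⟨h1, h2, h3⟩ := (ihM x).1 hx
          exact ⟨h1, h2, by omega⟩
        · refine ⟨?_, by omega, by omega⟩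
          rcases hc with h | h
          · have := ((ihM _).1 h).1
            have := InSemi.addA (a := a) (b := b) this
            simpa using this
          · have := ((ihM _).1 h).1
            have := InSemi.addB (a := a) (b := b) this
            simpa using this
      · rintro ⟨h1, h2, h3⟩
        by_cases hxt : x ≤ (t : Int)
        · exact Or.inl ((ihM x).2 ⟨h1, h2, hxt⟩)
        · exact Or.inr (by omega)
    · rw [if_neg hc]
      refine ⟨ihN, fun x => ?_⟩
      constructor
      · intro hx
        obtain ⟨h1, h2, h3⟩ := (ihM x).1 hx
        exact ⟨h1, h2, by omega⟩
      · rintro ⟨h1, h2, h3⟩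
        by_cases hxt : x ≤ (t : Int)
        · exact (ihM x).2 ⟨h1, h2, hxt⟩
        · -- x = K; its generator K - a or K - b would already be in E, contradicting hc
          exfalso
          have hxK : x = K := by omega
          rcases insemi_inv ha hb h1 with h0 | ⟨hg, hgn⟩ | ⟨hg, hgn⟩
          · omega
          · have hx' : x - a ∈ E := (ihM (x - a)).2 ⟨hg, hgn, by omega⟩
            exact hc (Or.inl (by rwa [hxK] at hx'))
          · have hx' : x - b ∈ E := (ihM (x - b)).2 ⟨hg, hgn, by omega⟩
            exact hc (Or.inr (by rwa [hxK] at hx'))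

theorem pvCount_spec (a b M : Int) (ha : 1 ≤ a) (hb : 1 ≤ b) (hM : 0 ≤ M) :
    ∃ E : List Int, E.Nodup ∧ (∀ x, x ∈ E ↔ (InSemi a b x ∧ 0 ≤ x ∧ x ≤ M)) ∧
      pvCount a b M = (E.length : Int) := by
  obtain ⟨hN, hMem⟩ := pvSweep_spec a b ha hb M.toNat
  rw [Int.toNat_of_nonneg hM] at hN hMem
  exact ⟨_, hN, hMem, by rw [pvCount, if_neg (by omega)]⟩

-- ---- A side: the worklist loop returns exactly the semigroup elements of [0, maxVal] ----

theorem pairwise_lt_of_le_nodup {l : List Int} (h1 : l.Pairwise (· ≤ ·)) (h2 : l.Nodup) :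
    l.Pairwise (· < ·) :=
  (List.pairwise_and_iff.2 ⟨h1, h2⟩).imp (fun h => lt_of_le_of_ne h.1 h.2)

-- appending a fresh element and re-sorting: order, membership, and counts
theorem sortedInsert_spec (sg : List Int) (v : Int) (hs : sg.Pairwise (· < ·)) (hv : v ∉ sg) :
    (PySem.List.sorted (sg ++ [v]) (fun x => x) false).Pairwise (· < ·) ∧
    (∀ x, x ∈ PySem.List.sorted (sg ++ [v]) (fun x => x) false ↔ x ∈ sg ∨ x = v) ∧
    (∀ p : Int → Bool, (PySem.List.sorted (sg ++ [v]) (fun x => x) false).countP p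
        = sg.countP p + (if p v then 1 else 0)) := by
  have hperm := PySem.List.sorted_perm (sg ++ [v]) (fun x => x) false
  have hnd : (sg ++ [v]).Nodup := by
    rw [List.nodup_append]
    exact ⟨hs.imp ne_of_lt, by simp, by intro x hx; simp; rintro rfl; exact hv hx⟩
  refine ⟨pairwise_lt_of_le_nodup ?_ (hperm.nodup_iff.2 hnd), fun x => ?_, fun p => ?_⟩
  · simpa using PySem.List.sorted_pairwise (sg ++ [v]) (fun x => x)
  · rw [hperm.mem_iff]; simp
  · rw [hperm.countP_eq, List.countP_append]; simp [List.countP_cons]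

-- the conditional insert step of getSemigroupLoop
theorem condInsert_spec (sg sg' : List Int) (v M num : Int)
    (hsor : sg.Pairwise (· < ·)) (hgt : num < v)
    (h' : sg' = if ¬ v ∈ sg ∧ v ≤ M then PySem.List.sorted (sg ++ [v]) (fun x => x) false else sg) :
    sg'.Pairwise (· < ·) ∧ (∀ x, x ∈ sg' ↔ x ∈ sg ∨ (x = v ∧ v ≤ M)) ∧
    sg'.countP (fun y => decide (y < num)) = sg.countP (fun y => decide (y < num)) := by
  by_cases c : ¬ v ∈ sg ∧ v ≤ M
  · rw [if_pos c] at h'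
    obtain ⟨hp, hm, hc⟩ := sortedInsert_spec sg v hsor c.1
    subst h'
    refine ⟨hp, fun x => ?_, ?_⟩
    · rw [hm x]
      constructor
      · rintro (h | rfl)
        · exact Or.inl h
        · exact Or.inr ⟨rfl, c.2⟩
      · rintro (h | ⟨rfl, _⟩)
        · exact Or.inl h
        · exact Or.inr rfl
    · rw [hc]
      simp [show ¬ (v < num) by omega]
  · rw [if_neg c] at h'
    subst h'
    refine ⟨hsor, fun x => ?_, rfl⟩
    constructor
    · exact fun h => Or.inl h
    · rintro (h | ⟨rfl, hle⟩)
      · exact h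
      · by_contra hn
        exact c ⟨hn, hle⟩

theorem getElem_rank (l : List Int) (hl : l.Pairwise (· < ·)) :
    ∀ x, x ∈ l → ∃ h : l.countP (fun y => decide (y < x)) < l.length,
      l[l.countP (fun y => decide (y < x))]'h = x := by
  induction l with
  | nil => simp
  | cons z t ih =>
    intro x hx
    have hzt := List.pairwise_cons.1 hl
    rcases List.mem_cons.1 hx with rfl | hx
    · have h0 : (x :: t).countP (fun y => decide (y < x)) = 0 := by
        simp only [List.countP_cons]
        rw [List.countP_eq_zero.2
          (fun y hy => by have := hzt.1 y hy; simp only [decide_eq_true_eq]; omega)]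
        simp
      rw [h0]
      exact ⟨by simp, rfl⟩
    · have hz : z < x := hzt.1 x hx
      obtain ⟨h, he⟩ := ih hzt.2 x hx
      have hcnt : (z :: t).countP (fun y => decide (y < x)) = t.countP (fun y => decide (y < x)) + 1 := by
        simp only [List.countP_cons]
        simp [hz]
      rw [hcnt]
      exact ⟨by simpa using h, by simpa using he⟩

theorem sorted_index_lt (l : List Int) (hl : l.Pairwise (· < ·)) {i j : Nat}
    (hi : i < l.length) (hj : j < l.length) (hij : l[i] < l[j]) : i < j := by
  rcases Nat.lt_trichotomy i j with h | h | h
  · exact h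
  · subst h; omega
  · have := List.pairwise_iff_getElem.1 hl j i hj hi h
    omega

theorem length_le_of_nodup_range (l : List Int) (M : Int) (hM : 0 ≤ M) (hN : l.Nodup)
    (hB : ∀ x ∈ l, 0 ≤ x ∧ x ≤ M) : l.length ≤ M.toNat + 1 := by
  have h1 : l.toFinset ⊆ Finset.Icc (0 : Int) M := by
    intro x hx
    rw [List.mem_toFinset] at hx
    simpa [Finset.mem_Icc] using hB x hx
  have h2 := Finset.card_le_card h1
  rw [List.toFinset_card_of_nodup hN, Int.card_Icc] at h2
  omega

theorem loop_spec (a b M : Int) (ha : 1 ≤ a) (hb : 1 ≤ b) (hM : 0 ≤ M) :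
    ∀ (fuel : Nat) (sg : List Int) (idx : Nat),
      sg.Pairwise (· < ·) →
      (∀ x ∈ sg, InSemi a b x ∧ 0 ≤ x ∧ x ≤ M) →
      (0 : Int) ∈ sg →
      ∀ (hidx : idx < sg.length),
      (∀ x ∈ sg, x < sg[idx] → (x + a ≤ M → x + a ∈ sg) ∧ (x + b ≤ M → x + b ∈ sg)) →
      M.toNat + 1 ≤ fuel + idx →
      (getSemigroupLoop a b M fuel sg idx).Pairwise (· < ·) ∧
      (∀ x, x ∈ getSemigroupLoop a b M fuel sg idx ↔ (InSemi a b x ∧ 0 ≤ x ∧ x ≤ M)) := by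
  intro fuel
  induction fuel with
  | zero =>
    intro sg idx hsor hall h0 hidx hcl hfuel
    exfalso
    have := length_le_of_nodup_range sg M hM (hsor.imp ne_of_lt)
      (fun x hx => ⟨(hall x hx).2.1, (hall x hx).2.2⟩)
    omega
  | succ fuel ih =>
    intro sg idx hsor hall h0 hidx hcl hfuel
    have hget : sg[idx]? = some sg[idx] := List.getElem?_eq_getElem hidx
    simp only [getSemigroupLoop, hget]
    set num := sg[idx] with hnumdef
    set sg1 := if ¬ num + a ∈ sg ∧ num + a ≤ M
      then PySem.List.sorted (sg ++ [num + a]) (fun x => x) false else sg with hsg1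
    set sg2 := if ¬ num + b ∈ sg1 ∧ num + b ≤ M
      then PySem.List.sorted (sg1 ++ [num + b]) (fun x => x) false else sg1 with hsg2
    obtain ⟨hsor1, hmem1, hcnt1⟩ := condInsert_spec sg sg1 (num + a) M num hsor (by omega) hsg1
    obtain ⟨hsor2, hmem1to2, hcnt2⟩ := condInsert_spec sg1 sg2 (num + b) M num hsor1 (by omega) hsg2
    have hmem2 : ∀ x, x ∈ sg2 ↔ x ∈ sg ∨ (x = num + a ∧ num + a ≤ M) ∨ (x = num + b ∧ num + b ≤ M) := by
      intro x
      rw [hmem1to2 x, hmem1 x]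
      tauto
    have hnum_mem : num ∈ sg := List.getElem_mem hidx
    have hPnum := hall num hnum_mem
    have hall2 : ∀ x ∈ sg2, InSemi a b x ∧ 0 ≤ x ∧ x ≤ M := by
      intro x hx
      rcases (hmem2 x).1 hx with h | ⟨rfl, hle⟩ | ⟨rfl, hle⟩
      · exact hall x h
      · exact ⟨hPnum.1.addA, by omega, hle⟩
      · exact ⟨hPnum.1.addB, by omega, hle⟩
    by_cases hret : num + a > M ∧ num + b > M
    · rw [if_pos hret]
      have hsg2eq : sg2 = sg := by
        rw [hsg2, if_neg (by rintro ⟨-, h⟩; omega), hsg1, if_neg (by rintro ⟨-, h⟩; omega)]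
      rw [hsg2eq]
      obtain ⟨hr1, hr2⟩ := hret
      -- completeness: every semigroup element ≤ M is already present
      have hcomp : ∀ x, InSemi a b x → x ≤ M → x ∈ sg := by
        intro x hx
        induction hx with
        | zero => exact fun _ => h0
        | @addA y hy ihy =>
          intro h3
          exact (hcl y (ihy (by omega)) (by omega)).1 h3
        | @addB y hy ihy =>
          intro h3
          exact (hcl y (ihy (by omega)) (by omega)).2 h3
      exact ⟨hsor, fun x => ⟨fun hx => hall x hx, fun ⟨h1, h2, h3⟩ => hcomp x h1 h3⟩⟩
    · rw [if_neg hret]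
      -- position of num in sg2 is still idx
      have hrank : sg.countP (fun y => decide (y < num)) = idx := by
        obtain ⟨hlt', hval'⟩ := getElem_rank sg hsor num hnum_mem
        have hnd : sg.Nodup := hsor.imp ne_of_lt
        exact (List.Nodup.getElem_inj_iff hnd).1 (by rw [hval'])
      have hrank2 : sg2.countP (fun y => decide (y < num)) = idx := by rw [hcnt2, hcnt1, hrank]
      obtain ⟨hcl0, hcv0⟩ := getElem_rank sg2 hsor2 num ((hmem2 num).2 (Or.inl hnum_mem))
      have hq : sg2[idx]? = some num := by
        rw [← hrank2, List.getElem?_eq_getElem hcl0, hcv0]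
      obtain ⟨hidx2, hval2⟩ := List.getElem?_eq_some_iff.1 hq
      -- there is an element of sg2 beyond position idx
      have hbig : ∃ v ∈ sg2, num < v := by
        rcases not_and_or.1 hret with h | h
        · exact ⟨num + a, (hmem2 _).2 (Or.inr (Or.inl ⟨rfl, by omega⟩)), by omega⟩
        · exact ⟨num + b, (hmem2 _).2 (Or.inr (Or.inr ⟨rfl, by omega⟩)), by omega⟩
      have hidx2' : idx + 1 < sg2.length := by
        obtain ⟨v, hv, hvgt⟩ := hbig
        obtain ⟨j, hj, hje⟩ := List.mem_iff_getElem.1 hv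
        have : idx < j := sorted_index_lt sg2 hsor2 hidx2 hj (by rw [hval2, hje]; exact hvgt)
        omega
      have hcl2 : ∀ x ∈ sg2, x < sg2[idx + 1] →
          (x + a ≤ M → x + a ∈ sg2) ∧ (x + b ≤ M → x + b ∈ sg2) := by
        intro x hx hlt
        have hxle : x ≤ num := by
          by_contra hgt'
          have hgt : num < x := lt_of_not_ge hgt'
          obtain ⟨j, hj, hje⟩ := List.mem_iff_getElem.1 hx
          have h1 : idx < j := sorted_index_lt sg2 hsor2 hidx2 hj (by rw [hval2, hje]; exact hgt)
          have h2 : j < idx + 1 := sorted_index_lt sg2 hsor2 hj hidx2' (by rw [hje]; exact hlt)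
          omega
        rcases eq_or_lt_of_le hxle with rfl | hxlt
        · exact ⟨fun h => (hmem2 _).2 (Or.inr (Or.inl ⟨rfl, h⟩)),
                 fun h => (hmem2 _).2 (Or.inr (Or.inr ⟨rfl, h⟩))⟩
        · have hxsg : x ∈ sg := by
            rcases (hmem2 x).1 hx with h | ⟨rfl, _⟩ | ⟨rfl, _⟩
            · exact h
            · omega
            · omega
          obtain ⟨hca, hcb⟩ := hcl x hxsg hxlt
          exact ⟨fun h => (hmem2 _).2 (Or.inl (hca h)),
                 fun h => (hmem2 _).2 (Or.inl (hcb h))⟩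
      exact ih sg2 (idx + 1) hsor2 hall2 ((hmem2 0).2 (Or.inl h0)) hidx2' hcl2 (by omega)

theorem getSemigroup_spec (a b M : Int) (ha : 1 ≤ a) (hb : 1 ≤ b) (hM : 0 ≤ M) :
    (getSemigroupLoop a b M (M.toNat + 2) [0] 0).Nodup ∧
      (∀ x, x ∈ getSemigroupLoop a b M (M.toNat + 2) [0] 0 ↔ (InSemi a b x ∧ 0 ≤ x ∧ x ≤ M)) := by
  obtain ⟨hp, hm⟩ := loop_spec a b M ha hb hM (M.toNat + 2) [0] 0
    (by simp) (by intro x hx; simp at hx; subst hx; exact ⟨InSemi.zero, le_refl _, hM⟩)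
    (by simp) (by simp)
    (by intro x hx hlt; simp at hx; subst hx; simp at hlt)
    (by omega)
  exact ⟨hp.imp ne_of_lt, hm⟩

theorem getSemigroup_neg (a b l degree : Int) (ha : 1 ≤ a) (hb : 1 ≤ b) (hM : l * degree < 0) :
    getSemigroup a b l degree = [0] := by
  have h0 : (l * degree).toNat = 0 := by omega
  rw [getSemigroup, h0, getSemigroupLoop]
  simp only [List.getElem?_cons_zero]
  rw [if_neg (show ¬ (¬ (0:Int) + a ∈ [(0:Int)] ∧ (0:Int) + a ≤ l * degree) by rintro ⟨-, h⟩; omega)]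
  rw [if_neg (show ¬ (¬ (0:Int) + b ∈ [(0:Int)] ∧ (0:Int) + b ≤ l * degree) by rintro ⟨-, h⟩; omega)]
  rw [if_pos (show ((0:Int) + a > l * degree ∧ (0:Int) + b > l * degree) from ⟨by omega, by omega⟩)]

-- per-l check agreement: len(getSemigroup) = c  ↔  pvCount = c, for the c ≥ 2 actually compared
theorem check_iff (a b l degree c : Int) (ha : 1 ≤ a) (hb : 1 ≤ b) (hc : 2 ≤ c) :
    (((getSemigroup a b l degree).length : Int) = c) ↔ (pvCount a b (l * degree) = c) := by
  rcases lt_or_ge (l * degree) 0 with hM | hM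
  · rw [getSemigroup_neg a b l degree ha hb hM, pvCount, if_pos hM]
    simp only [List.length_cons, List.length_nil]
    constructor <;> (intro h; omega)
  · obtain ⟨hnd, hmem⟩ := getSemigroup_spec a b (l * degree) ha hb hM
    obtain ⟨E, hEnd, hEmem, hEcnt⟩ := pvCount_spec a b (l * degree) ha hb hM
    have hperm : (getSemigroupLoop a b (l * degree) ((l * degree).toNat + 2) [0] 0).Perm E := by
      apply List.perm_of_nodup_nodup_toFinset_eq hnd hEnd
      ext x
      simp only [List.mem_toFinset]
      rw [hmem x, hEmem x]
    rw [getSemigroup, hEcnt, hperm.length_eq]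

theorem valid_eq_passes (m n degree : Int) (hm : 1 ≤ m) (hn : 1 ≤ n) :
    ((PySem.List.pyRange 1 4 1).foldl (fun valid l =>
        if (((getSemigroup m n l degree).length : Int) ≠ (l+1)*(l+2)/2) then false else valid) true)
      = pvPasses m n degree := by
  have hr : PySem.List.pyRange 1 4 1 = [1, 2, 3] := by decide
  rw [pvPasses, hr]
  simp only [List.foldl_cons, List.foldl_nil, List.all_cons, List.all_nil]
  have e1 := check_iff m n 1 degree 3 hm hn (by omega)
  have e2 := check_iff m n 2 degree 6 hm hn (by omega)
  have e3 := check_iff m n 3 degree 10 hm hn (by omega)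
  norm_num at e1 e2 e3 ⊢
  by_cases c1 : pvCount m n degree = 3 <;>
    by_cases c2 : pvCount m n (2 * degree) = 6 <;>
      by_cases c3 : pvCount m n (3 * degree) = 10 <;>
        simp [c1, c2, c3, e1, e2, e3]

-- shifting a unit-step integer range by one
theorem foldl_pyRange_shift {γ : Type} (f : γ → Int → γ) (aa bb : Int) (init : γ) :
    (PySem.List.pyRange (aa + 1) (bb + 1) 1).foldl f init
      = (PySem.List.pyRange aa bb 1).foldl (fun acc x => f acc (x + 1)) init := by
  rw [PySem.List.pyRange_one aa bb, PySem.List.pyRange_one (aa + 1) (bb + 1)]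
  rw [show (bb + 1 - (aa + 1)).toNat = (bb - aa).toNat by omega]
  rw [List.foldl_map, List.foldl_map]
  exact List.foldl_ext _ _ _ (fun acc k _ => by rw [show aa + 1 + (k : Int) = aa + (k : Int) + 1 by ring])

-- Source B's trial-division loop as a fold over the candidate range [1, d_inv]
theorem divLoop_eq_foldl (D L degree : Int) :
    ∀ (fuel : Nat) (e : Int) (pairs : List (Int × Int)), 1 ≤ e → D + 1 ≤ e + fuel →
      pvDivLoop D L degree fuel e pairs
        = (PySem.List.pyRange e (D + 1) 1).foldl (fun acc e =>
            if e * e ≤ D then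
              if PySem.Int.mod D e = 0 then
                if PySem.Int.floordiv D e + 1 < L ∧ pvPasses (e + 1) (PySem.Int.floordiv D e + 1) degree
                then acc ++ [(e + 1, PySem.Int.floordiv D e + 1)] else acc
              else acc
            else acc) pairs := by
  intro fuel
  induction fuel with
  | zero =>
    intro e pairs he hf
    rw [PySem.List.pyRange_one_eq_nil (by omega)]
    rfl
  | succ fuel ih =>
    intro e pairs he hf
    by_cases hg : e * e ≤ D
    · have hee : e ≤ e * e := by nlinarith [mul_nonneg (show (0:Int) ≤ e by omega) (show (0:Int) ≤ e - 1 by omega)]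
      rw [PySem.List.pyRange_one_cons (by omega), List.foldl_cons, pvDivLoop, if_pos hg, if_pos hg]
      exact ih (e + 1) _ (by omega) (by omega)
    · rw [pvDivLoop, if_neg hg]
      refine (foldl_id _ _ (fun acc x hx => ?_) pairs).symm
      rw [PySem.List.mem_pyRange_one] at hx
      have : e * e ≤ x * x := by nlinarith
      rw [if_neg (by omega)]

-- one row of A's quadratic scan equals one trial division of B
theorem rowA_eq_stepB (D L degree : Int) (e : Int) (he : 1 ≤ e)
    (acc : List (Int × Int)) :
    (PySem.List.pyRange (e + 1) L 1).foldl (fun pairs n =>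
        if (e + 1 - 1) * (n - 1) = D then
          (if pvPasses (e + 1) n degree then pairs ++ [(e + 1, n)] else pairs)
        else pairs) acc
      = (if e * e ≤ D then
          if PySem.Int.mod D e = 0 then
            if PySem.Int.floordiv D e + 1 < L ∧ pvPasses (e + 1) (PySem.Int.floordiv D e + 1) degree
            then acc ++ [(e + 1, PySem.Int.floordiv D e + 1)] else acc
          else acc
        else acc) := by
  simp only [show e + 1 - 1 = e from by ring]
  by_cases hg : e * e ≤ D
  · rw [if_pos hg]
    by_cases hm : PySem.Int.mod D e = 0
    · rw [if_pos hm]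
      have hdvd : e ∣ D := (PySem.Int.mod_eq_zero_iff_dvd D e).1 hm
      have hfd : PySem.Int.floordiv D e = D / e := PySem.Int.floordiv_eq_ediv_of_pos (by omega)
      set q := D / e with hqdef
      have hq : e * q = D := Int.mul_ediv_cancel' hdvd
      have heq : e ≤ q := le_of_mul_le_mul_left (by omega) (show (0:Int) < e by omega)
      rw [hfd]
      by_cases hn0 : q + 1 < L
      · rw [PySem.List.pyRange_one_append (e + 1) (q + 1) L (by omega) (by omega),
          List.foldl_append, PySem.List.pyRange_one_cons hn0, List.foldl_cons]
        rw [foldl_id _ _ (fun acc' n hn => by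
          rw [PySem.List.mem_pyRange_one] at hn
          have : e * (n - 1) < e * q := by nlinarith
          rw [if_neg (by omega)]) acc]
        rw [if_pos (show e * (q + 1 - 1) = D by rw [show q + 1 - 1 = q from by ring, hq])]
        rw [foldl_id _ _ (fun acc' n hn => by
          rw [PySem.List.mem_pyRange_one] at hn
          have : e * q < e * (n - 1) := by nlinarith
          rw [if_neg (by omega)]) _]
        by_cases hp : pvPasses (e + 1) (q + 1) degree
        · rw [if_pos hp, if_pos ⟨hn0, hp⟩]
        · rw [if_neg hp, if_neg (by rintro ⟨-, h⟩; exact hp h)]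
      · rw [if_neg (by rintro ⟨h, -⟩; omega)]
        refine foldl_id _ _ (fun acc' n hn => ?_) acc
        rw [PySem.List.mem_pyRange_one] at hn
        have : e * (n - 1) < e * q := by nlinarith
        rw [if_neg (by omega)]
    · rw [if_neg hm]
      have hnd : ¬ e ∣ D := fun hd => hm ((PySem.Int.mod_eq_zero_iff_dvd D e).2 hd)
      refine foldl_id _ _ (fun acc' n hn => ?_) acc
      rw [PySem.List.mem_pyRange_one] at hn
      exact if_neg (fun hEq => hnd ⟨n - 1, hEq.symm⟩)
  · rw [if_neg hg]
    refine foldl_id _ _ (fun acc' n hn => ?_) acc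
    rw [PySem.List.mem_pyRange_one] at hn
    have : e * e ≤ e * (n - 1) := by nlinarith
    rw [if_neg (by omega)]

-- ===== VERDICT (by name: the statement is the Claim_ definition above) =====
theorem singleNewtonPairs_spec : Claim_equal_singleNewtonPairs := by
  intro degree _
  unfold Spec_singleNewtonPairs
  by_cases h0 : degree = 0
  · subst h0; decide
  by_cases h1 : degree = 1
  · subst h1; decide
  by_cases h2 : degree = 2
  · subst h2; decide
  set D := (degree - 1) * (degree - 2) with hDdef
  set L := degree * degree with hLdef
  have hD : 1 ≤ D := by
    rcases lt_or_ge degree 0 with h | h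
    · have key : 2 * 3 ≤ (1 - degree) * (2 - degree) :=
        mul_le_mul (by omega) (by omega) (by omega) (by omega)
      nlinarith
    · have h3 : 3 ≤ degree := by omega
      have key : 2 * 1 ≤ (degree - 1) * (degree - 2) :=
        mul_le_mul (by omega) (by omega) (by omega) (by omega)
      omega
  have hL : 1 ≤ L := by
    have := mul_self_pos.mpr h0
    omega
  -- step functions
  set stepA : List (Int × Int) → Int → List (Int × Int) := fun pairs m =>
    (PySem.List.pyRange m L 1).foldl (fun pairs n =>
      if (m - 1) * (n - 1) = D then
        (if pvPasses m n degree then pairs ++ [(m, n)] else pairs)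
      else pairs) pairs with hstepA
  set stepB : List (Int × Int) → Int → List (Int × Int) := fun acc e =>
    if e * e ≤ D then
      if PySem.Int.mod D e = 0 then
        if PySem.Int.floordiv D e + 1 < L ∧ pvPasses (e + 1) (PySem.Int.floordiv D e + 1) degree
        then acc ++ [(e + 1, PySem.Int.floordiv D e + 1)] else acc
      else acc
    else acc with hstepB
  set Y : Int := max (D + 1) (L - 1) with hYdef
  have hY1 : D + 1 ≤ Y := le_max_left _ _
  have hY2 : L - 1 ≤ Y := le_max_right _ _
  -- A's port reduces to a fold of stepA over [1, L)
  have hA : singleNewtonPairs degree = (PySem.List.pyRange 1 L 1).foldl stepA [] := by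
    simp only [singleNewtonPairs, hstepA, ← hDdef, ← hLdef]
    refine List.foldl_ext _ _ _ (fun acc m hm => ?_)
    refine List.foldl_ext _ _ _ (fun acc' n hn => ?_)
    rw [PySem.List.mem_pyRange_one] at hm hn
    by_cases hEq : (m - 1) * (n - 1) = D
    · rw [if_pos hEq, if_pos hEq, valid_eq_passes m n degree (by omega) (by omega)]
    · rw [if_neg hEq, if_neg hEq]
  -- extend A's range to [1, Y+1), drop the no-op row m = 1, and shift
  have hAex : (PySem.List.pyRange 1 L 1).foldl stepA []
      = (PySem.List.pyRange 1 (Y + 1) 1).foldl stepA [] := by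
    rw [PySem.List.pyRange_one_append 1 L (Y + 1) (by omega) (by omega), List.foldl_append]
    refine (foldl_id _ _ (fun acc m hm => ?_) _).symm
    rw [PySem.List.mem_pyRange_one] at hm
    rw [hstepA]
    beta_reduce
    rw [PySem.List.pyRange_one_eq_nil (by omega)]
    rfl
  have hArow1 : stepA [] 1 = [] := by
    rw [hstepA]
    refine foldl_id _ _ (fun acc n hn => ?_) []
    rw [if_neg (by rw [show (1:Int) - 1 = 0 from rfl, zero_mul]; omega)]
  have hAshift : (PySem.List.pyRange 1 (Y + 1) 1).foldl stepA []
      = (PySem.List.pyRange 1 Y 1).foldl (fun acc e => stepA acc (e + 1)) [] := by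
    rw [PySem.List.pyRange_one_cons (by omega), List.foldl_cons, hArow1]
    rw [show (1 : Int) + 1 = 1 + 1 from rfl]
    exact foldl_pyRange_shift stepA 1 Y []
  -- the shifted rows are exactly B's trial divisions
  have hrows : (PySem.List.pyRange 1 Y 1).foldl (fun acc e => stepA acc (e + 1)) []
      = (PySem.List.pyRange 1 Y 1).foldl stepB [] := by
    refine List.foldl_ext _ _ _ (fun acc e he => ?_)
    rw [PySem.List.mem_pyRange_one] at he
    rw [hstepA, hstepB]
    exact rowA_eq_stepB D L degree e (by omega) acc
  -- B's port reduces to a fold of stepB over [1, Y)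
  have hB : singleNewtonPairs_alt degree = (PySem.List.pyRange 1 Y 1).foldl stepB [] := by
    simp only [singleNewtonPairs_alt, ← hDdef, ← hLdef]
    rw [if_neg (by omega)]
    rw [divLoop_eq_foldl D L degree (D.toNat + 1) 1 [] (by omega) (by omega), ← hstepB]
    rw [PySem.List.pyRange_one_append 1 (D + 1) Y (by omega) (by omega), List.foldl_append]
    refine (foldl_id _ _ (fun acc e he => ?_) _).symm
    rw [PySem.List.mem_pyRange_one] at he
    rw [hstepB]
    beta_reduce
    have hee : e ≤ e * e := by nlinarith [mul_nonneg (show (0:Int) ≤ e by omega) (show (0:Int) ≤ e - 1 by omega)]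
    rw [if_neg (by omega)]
  rw [hA, hAex, hAshift, hrows, hB]
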